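-- pv_equiv track=rewrite | github.com/IggyIkenna/basis-strategy-v1 | scripts/analyze_all_configs.py | _infer_python_type
-- ===== SOURCE A (Python) =====
-- from typing import Dict, Any, Set, List
--
-- def _infer_python_type(field_types: Set[str]) -> str:
--     """Infer Python type from observed field types."""
--     types = list(field_types)
--
--     # Check for common patterns
--     if any('dict' in t for t in types):
--         return 'Dict[str, Any]'
--     elif any('list' in t for t in types):
--         return 'List[Any]'
--     elif any('bool:' in t for t in types):
--         return 'bool'
--     elif any('int:' in t for t in types):
--         return 'int'
--     elif any('float:' in t for t in types):
--         return 'float'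
--     elif any('str:' in t for t in types):
--         return 'str'
--     else:
--         return 'Any'
-- ===== SOURCE B (Python) =====
-- PATTERNS = ['dict', 'list', 'bool:', 'int:', 'float:', 'str:']
-- RESULTS = ['Dict[str, Any]', 'List[Any]', 'bool', 'int', 'float', 'str', 'Any']
--
--
-- def _rank(t):
--     """Priority rank of one observed type string: index of the first matching
--     pattern, or len(PATTERNS) if none matches."""
--     for i, p in enumerate(PATTERNS):
--         if p in t:
--             return i
--     return len(PATTERNS)
--
--
-- def _infer_python_type(field_types):
--     """Infer Python type: classify each string once into a numeric rank,
--     reduce with min, then index the result table."""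
--     best = len(PATTERNS)
--     for t in field_types:
--         r = _rank(t)
--         if r < best:
--             best = r
--     return RESULTS[best]
-- ===== Notes on version B (the rewrite author's own statement) =====
-- stated objective: alternative
-- what changed: B classifies each input string exactly once into a numeric priority rank (index of its first matching pattern), reduces the ranks with a running minimum, and indexes a result table by the minimum rank, instead of A's six sequential whole-list substring scans and if/elif chain.
import Mathlib
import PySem

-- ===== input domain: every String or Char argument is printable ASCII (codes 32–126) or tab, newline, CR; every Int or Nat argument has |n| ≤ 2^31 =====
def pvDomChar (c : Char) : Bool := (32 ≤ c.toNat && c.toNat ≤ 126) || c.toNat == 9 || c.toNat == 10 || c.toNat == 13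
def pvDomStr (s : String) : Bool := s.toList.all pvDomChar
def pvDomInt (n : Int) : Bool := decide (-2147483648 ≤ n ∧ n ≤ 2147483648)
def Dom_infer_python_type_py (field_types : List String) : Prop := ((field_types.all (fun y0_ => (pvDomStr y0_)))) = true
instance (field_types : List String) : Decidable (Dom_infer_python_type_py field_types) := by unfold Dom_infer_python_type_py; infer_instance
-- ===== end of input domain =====

-- ===== PORT A =====
-- B classifies each string once into a numeric priority rank and min-reduces, instead of A's six sequential whole-list scans (alternative decomposition, same cost).
def infer_python_type_py (field_types : List String) : String :=
  let types := field_types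
  if types.any (fun t => PySem.Str.isIn "dict" t) then "Dict[str, Any]"
  else if types.any (fun t => PySem.Str.isIn "list" t) then "List[Any]"
  else if types.any (fun t => PySem.Str.isIn "bool:" t) then "bool"
  else if types.any (fun t => PySem.Str.isIn "int:" t) then "int"
  else if types.any (fun t => PySem.Str.isIn "float:" t) then "float"
  else if types.any (fun t => PySem.Str.isIn "str:" t) then "str"
  else "Any"

-- ===== PORT B =====
def pvPatterns : List String := ["dict", "list", "bool:", "int:", "float:", "str:"]
def pvResults : List String := ["Dict[str, Any]", "List[Any]", "bool", "int", "float", "str", "Any"]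

-- _rank: index of the first pattern contained in t, else pvPatterns.length
def pvRankAux (t : String) : List String → Nat → Nat
  | [], i => i
  | p :: ps, i => if PySem.Str.isIn p t then i else pvRankAux t ps (i + 1)

def pvRank (t : String) : Nat := pvRankAux t pvPatterns 0

def infer_python_type_py_alt (field_types : List String) : String :=
  let best := field_types.foldl (fun b t => let r := pvRank t; if r < b then r else b) pvPatterns.length
  -- RESULTS[best]: best ≤ 6 always, so the plain-index access never raises
  pvResults.getD best "Any"

-- ===== PRECONDITION & SPEC =====
def Spec_infer_python_type_py (field_types : List String) (out : String) : Prop := out = infer_python_type_py_alt field_types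
instance (field_types : List String) (out : String) : Decidable (Spec_infer_python_type_py field_types out) := by unfold Spec_infer_python_type_py; infer_instance

-- ===== CLAIM (what is proved, stated in full; the proofs are below) =====
def Claim_equal_infer_python_type_py : Prop := ∀ (field_types : List String), Dom_infer_python_type_py field_types → Spec_infer_python_type_py field_types (infer_python_type_py field_types)

-- ===== LEMMAS AND PROOFS =====

def pvBest (ts : List String) : Nat :=
  ts.foldl (fun b t => let r := pvRank t; if r < b then r else b) pvPatterns.length

lemma pvRank_le_six (t : String) : pvRank t ≤ 6 := by
  simp only [pvRank, pvPatterns, pvRankAux]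
  split_ifs <;> omega

lemma pvStep_eq_min :
    (fun (b : Nat) (t : String) => let r := pvRank t; if r < b then r else b) =
      (fun (b : Nat) (t : String) => min b (pvRank t)) := by
  funext b t
  show (if pvRank t < b then pvRank t else b) = min b (pvRank t)
  split <;> omega

lemma pvBest_foldl (ts : List String) (b : Nat) (hb : b ≤ 6) :
    ts.foldl (fun b t => min b (pvRank t)) b = min b (pvBest ts) := by
  induction ts generalizing b with
  | nil =>
    simp only [pvBest, pvStep_eq_min, pvPatterns, List.foldl_nil]
    simp only [List.length_cons, List.length_nil]
    omega
  | cons t ts ih =>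
    have h6 := pvRank_le_six t
    simp only [pvBest, pvStep_eq_min, pvPatterns, List.length_cons, List.length_nil,
      List.foldl_cons] at *
    rw [ih (min b (pvRank t)) (by omega), ih (min (0+1+1+1+1+1+1) (pvRank t)) (by omega)]
    omega

lemma pvBest_cons (t : String) (ts : List String) :
    pvBest (t :: ts) = min (pvRank t) (pvBest ts) := by
  have h6 := pvRank_le_six t
  simp only [pvBest, pvStep_eq_min, List.foldl_cons]
  rw [pvBest_foldl ts _ (by simp only [pvPatterns, List.length_cons, List.length_nil]; omega)]
  simp only [pvBest, pvStep_eq_min, pvPatterns, List.length_cons, List.length_nil]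
  omega

lemma pvBest_le_iff (ts : List String) (j : Nat) :
    pvBest ts ≤ j ↔ 6 ≤ j ∨ ∃ t ∈ ts, pvRank t ≤ j := by
  induction ts with
  | nil =>
    simp only [pvBest, List.foldl_nil, pvPatterns, List.length_cons, List.length_nil,
      List.not_mem_nil]
    constructor
    · intro h; exact Or.inl (by omega)
    · rintro (h | ⟨t, ht, _⟩)
      · omega
      · exact absurd ht (by simp)
  | cons t ts ih =>
    rw [pvBest_cons]
    simp only [List.mem_cons, min_le_iff, ih]
    constructor
    · rintro (h | (h | ⟨u, hu, hru⟩))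
      · exact Or.inr ⟨t, Or.inl rfl, h⟩
      · exact Or.inl h
      · exact Or.inr ⟨u, Or.inr hu, hru⟩
    · rintro (h | ⟨u, (rfl | hu), hru⟩)
      · exact Or.inr (Or.inl h)
      · exact Or.inl hru
      · exact Or.inr (Or.inr ⟨u, hu, hru⟩)

lemma pvRank_le0 (t : String) : pvRank t ≤ 0 ↔ PySem.Str.isIn "dict" t = true := by
  simp only [pvRank, pvPatterns, pvRankAux]; split_ifs <;> simp_all

lemma pvRank_le1 (t : String) : pvRank t ≤ 1 ↔
    (PySem.Str.isIn "dict" t = true ∨ PySem.Str.isIn "list" t = true) := by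
  simp only [pvRank, pvPatterns, pvRankAux]; split_ifs <;> simp_all

lemma pvRank_le2 (t : String) : pvRank t ≤ 2 ↔
    (PySem.Str.isIn "dict" t = true ∨ PySem.Str.isIn "list" t = true ∨
     PySem.Str.isIn "bool:" t = true) := by
  simp only [pvRank, pvPatterns, pvRankAux]; split_ifs <;> simp_all

lemma pvRank_le3 (t : String) : pvRank t ≤ 3 ↔
    (PySem.Str.isIn "dict" t = true ∨ PySem.Str.isIn "list" t = true ∨
     PySem.Str.isIn "bool:" t = true ∨ PySem.Str.isIn "int:" t = true) := by
  simp only [pvRank, pvPatterns, pvRankAux]; split_ifs <;> simp_all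

lemma pvRank_le4 (t : String) : pvRank t ≤ 4 ↔
    (PySem.Str.isIn "dict" t = true ∨ PySem.Str.isIn "list" t = true ∨
     PySem.Str.isIn "bool:" t = true ∨ PySem.Str.isIn "int:" t = true ∨
     PySem.Str.isIn "float:" t = true) := by
  simp only [pvRank, pvPatterns, pvRankAux]; split_ifs <;> simp_all

lemma pvRank_le5 (t : String) : pvRank t ≤ 5 ↔
    (PySem.Str.isIn "dict" t = true ∨ PySem.Str.isIn "list" t = true ∨
     PySem.Str.isIn "bool:" t = true ∨ PySem.Str.isIn "int:" t = true ∨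
     PySem.Str.isIn "float:" t = true ∨ PySem.Str.isIn "str:" t = true) := by
  simp only [pvRank, pvPatterns, pvRankAux]; split_ifs <;> simp_all

-- ===== VERDICT (by name: the statement is the Claim_ definition above) =====
theorem infer_python_type_py_spec : Claim_equal_infer_python_type_py := by
  intro ts _
  unfold Spec_infer_python_type_py infer_python_type_py infer_python_type_py_alt
  show _ = pvResults.getD (pvBest ts) "Any"
  have hle6 : pvBest ts ≤ 6 := (pvBest_le_iff ts 6).mpr (Or.inl le_rfl)
  by_cases h0 : ts.any (fun t => PySem.Str.isIn "dict" t) = true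
  · obtain ⟨t, ht, hd⟩ := List.any_eq_true.mp h0
    have : pvBest ts ≤ 0 := (pvBest_le_iff ts 0).mpr (Or.inr ⟨t, ht, (pvRank_le0 t).mpr hd⟩)
    have hb : pvBest ts = 0 := by omega
    rw [hb]; simp only [h0, if_true]; rfl
  · have h0' : ts.any (fun t => PySem.Str.isIn "dict" t) = false := by simpa using h0
    have n0 : ¬ pvBest ts ≤ 0 := by
      intro h
      rcases (pvBest_le_iff ts 0).mp h with h6 | ⟨t, ht, hr⟩
      · omega
      · exact h0 (List.any_eq_true.mpr ⟨t, ht, (pvRank_le0 t).mp hr⟩)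
    by_cases h1 : ts.any (fun t => PySem.Str.isIn "list" t) = true
    · obtain ⟨t, ht, hd⟩ := List.any_eq_true.mp h1
      have : pvBest ts ≤ 1 := (pvBest_le_iff ts 1).mpr (Or.inr ⟨t, ht, (pvRank_le1 t).mpr (Or.inr hd)⟩)
      have hb : pvBest ts = 1 := by omega
      rw [hb]; simp only [h0', h1, Bool.false_eq_true, if_false, if_true]; rfl
    · have h1' : ts.any (fun t => PySem.Str.isIn "list" t) = false := by simpa using h1
      have n1 : ¬ pvBest ts ≤ 1 := by
        intro h
        rcases (pvBest_le_iff ts 1).mp h with h6 | ⟨t, ht, hr⟩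
        · omega
        · rcases (pvRank_le1 t).mp hr with hh | hh
          · exact h0 (List.any_eq_true.mpr ⟨t, ht, hh⟩)
          · exact h1 (List.any_eq_true.mpr ⟨t, ht, hh⟩)
      by_cases h2 : ts.any (fun t => PySem.Str.isIn "bool:" t) = true
      · obtain ⟨t, ht, hd⟩ := List.any_eq_true.mp h2
        have : pvBest ts ≤ 2 := (pvBest_le_iff ts 2).mpr
          (Or.inr ⟨t, ht, (pvRank_le2 t).mpr (Or.inr (Or.inr hd))⟩)
        have hb : pvBest ts = 2 := by omega
        rw [hb]; simp only [h0', h1', h2, Bool.false_eq_true, if_false, if_true]; rfl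
      · have h2' : ts.any (fun t => PySem.Str.isIn "bool:" t) = false := by simpa using h2
        have n2 : ¬ pvBest ts ≤ 2 := by
          intro h
          rcases (pvBest_le_iff ts 2).mp h with h6 | ⟨t, ht, hr⟩
          · omega
          · rcases (pvRank_le2 t).mp hr with hh | hh | hh
            · exact h0 (List.any_eq_true.mpr ⟨t, ht, hh⟩)
            · exact h1 (List.any_eq_true.mpr ⟨t, ht, hh⟩)
            · exact h2 (List.any_eq_true.mpr ⟨t, ht, hh⟩)
        by_cases h3 : ts.any (fun t => PySem.Str.isIn "int:" t) = true
        · obtain ⟨t, ht, hd⟩ := List.any_eq_true.mp h3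
          have : pvBest ts ≤ 3 := (pvBest_le_iff ts 3).mpr
            (Or.inr ⟨t, ht, (pvRank_le3 t).mpr (Or.inr (Or.inr (Or.inr hd)))⟩)
          have hb : pvBest ts = 3 := by omega
          rw [hb]; simp only [h0', h1', h2', h3, Bool.false_eq_true, if_false, if_true]; rfl
        · have h3' : ts.any (fun t => PySem.Str.isIn "int:" t) = false := by simpa using h3
          have n3 : ¬ pvBest ts ≤ 3 := by
            intro h
            rcases (pvBest_le_iff ts 3).mp h with h6 | ⟨t, ht, hr⟩
            · omega
            · rcases (pvRank_le3 t).mp hr with hh | hh | hh | hh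
              · exact h0 (List.any_eq_true.mpr ⟨t, ht, hh⟩)
              · exact h1 (List.any_eq_true.mpr ⟨t, ht, hh⟩)
              · exact h2 (List.any_eq_true.mpr ⟨t, ht, hh⟩)
              · exact h3 (List.any_eq_true.mpr ⟨t, ht, hh⟩)
          by_cases h4 : ts.any (fun t => PySem.Str.isIn "float:" t) = true
          · obtain ⟨t, ht, hd⟩ := List.any_eq_true.mp h4
            have : pvBest ts ≤ 4 := (pvBest_le_iff ts 4).mpr
              (Or.inr ⟨t, ht, (pvRank_le4 t).mpr (Or.inr (Or.inr (Or.inr (Or.inr hd))))⟩)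
            have hb : pvBest ts = 4 := by omega
            rw [hb]; simp only [h0', h1', h2', h3', h4, Bool.false_eq_true, if_false, if_true]; rfl
          · have h4' : ts.any (fun t => PySem.Str.isIn "float:" t) = false := by simpa using h4
            have n4 : ¬ pvBest ts ≤ 4 := by
              intro h
              rcases (pvBest_le_iff ts 4).mp h with h6 | ⟨t, ht, hr⟩
              · omega
              · rcases (pvRank_le4 t).mp hr with hh | hh | hh | hh | hh
                · exact h0 (List.any_eq_true.mpr ⟨t, ht, hh⟩)
                · exact h1 (List.any_eq_true.mpr ⟨t, ht, hh⟩)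
                · exact h2 (List.any_eq_true.mpr ⟨t, ht, hh⟩)
                · exact h3 (List.any_eq_true.mpr ⟨t, ht, hh⟩)
                · exact h4 (List.any_eq_true.mpr ⟨t, ht, hh⟩)
            by_cases h5 : ts.any (fun t => PySem.Str.isIn "str:" t) = true
            · obtain ⟨t, ht, hd⟩ := List.any_eq_true.mp h5
              have : pvBest ts ≤ 5 := (pvBest_le_iff ts 5).mpr
                (Or.inr ⟨t, ht, (pvRank_le5 t).mpr (Or.inr (Or.inr (Or.inr (Or.inr (Or.inr hd)))))⟩)
              have hb : pvBest ts = 5 := by omega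
              rw [hb]
              simp only [h0', h1', h2', h3', h4', h5, Bool.false_eq_true, if_false, if_true]; rfl
            · have h5' : ts.any (fun t => PySem.Str.isIn "str:" t) = false := by simpa using h5
              have n5 : ¬ pvBest ts ≤ 5 := by
                intro h
                rcases (pvBest_le_iff ts 5).mp h with h6 | ⟨t, ht, hr⟩
                · omega
                · rcases (pvRank_le5 t).mp hr with hh | hh | hh | hh | hh | hh
                  · exact h0 (List.any_eq_true.mpr ⟨t, ht, hh⟩)
                  · exact h1 (List.any_eq_true.mpr ⟨t, ht, hh⟩)
                  · exact h2 (List.any_eq_true.mpr ⟨t, ht, hh⟩)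
                  · exact h3 (List.any_eq_true.mpr ⟨t, ht, hh⟩)
                  · exact h4 (List.any_eq_true.mpr ⟨t, ht, hh⟩)
                  · exact h5 (List.any_eq_true.mpr ⟨t, ht, hh⟩)
              have hb : pvBest ts = 6 := by omega
              rw [hb]
              simp only [h0', h1', h2', h3', h4', h5', Bool.false_eq_true, if_false]; rfl
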